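-- pv_equiv track=rewrite | github.com/deanzOo/id3_data_mining | Functions.py | FindingCommonValue
-- ===== SOURCE A (Python) =====
-- def FindingCommonValue(column):
--     my_dict = {}
--     for key in column:
--         if (key not in my_dict):
--             my_dict[key] = 1
--         else:
--             my_dict[key] += 1
--     return [k for k in my_dict.keys() if my_dict[k] == max(my_dict.values())][0]
-- ===== SOURCE B (Python) =====
-- def FindingCommonValue(column):
--     seen = set()
--     best = None
--     best_count = 0
--     for value in column:
--         if value not in seen:
--             seen.add(value)
--             c = column.count(value)
--             if c > best_count:
--                 best = value
--                 best_count = c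
--     return best
-- ===== Notes on version B (the rewrite author's own statement) =====
-- stated objective: alternative
-- what changed: B drops the counting dict entirely: one scan keeps a running strict argmax, counting each value with list.count the first time it is seen (a seen-set prevents recounting), instead of A's dict of counts plus a comprehension that recomputes max(values) for every key and then takes the first element.
import Mathlib
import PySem

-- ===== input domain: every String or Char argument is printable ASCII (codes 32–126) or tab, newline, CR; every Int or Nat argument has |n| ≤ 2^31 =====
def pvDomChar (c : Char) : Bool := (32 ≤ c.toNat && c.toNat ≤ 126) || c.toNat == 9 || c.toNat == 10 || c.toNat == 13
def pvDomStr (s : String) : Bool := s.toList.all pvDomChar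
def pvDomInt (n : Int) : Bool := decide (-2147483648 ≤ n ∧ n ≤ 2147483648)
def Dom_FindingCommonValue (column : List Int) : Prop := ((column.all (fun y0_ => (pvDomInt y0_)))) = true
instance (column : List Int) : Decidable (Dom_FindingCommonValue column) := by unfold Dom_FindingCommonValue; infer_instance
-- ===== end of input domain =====

-- B replaces A's counting dict + per-key max(values) recomputation by a single scan keeping a
-- running strict argmax, counting each value with list.count the first time it is seen; objective: alternative.


-- ===== PORT A =====
def FindingCommonValue (column : List Int) : Int :=
  let my_dict : PySem.Dict Int Int :=
    column.foldl (fun d key =>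
      if ¬ (d.contains key = true) then d.insert key 1
      else d.modify key 0 (· + 1)) PySem.Dict.empty
  -- the final comprehension-and-subscript: taking the first element of the empty
  -- comprehension raises IndexError in Python, so Pre_ excludes the empty column
  ((my_dict.keys.filter (fun k =>
      my_dict.get? k == PySem.List.max? my_dict.values (fun v => v))).headD 0)

-- ===== PORT B =====
-- state = (seen, (best, best_count)); best starts as zero standing for Python's None
-- (never returned on a nonempty column, where the first value's count is positive)
def FindingCommonValue_alt (column : List Int) : Int :=
  (column.foldl (fun (st : PySem.Set Int × Int × Int) value =>
      if ¬ (st.1.contains value = true) then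
        (PySem.Set.add st.1 value,
         if (column.count value : Int) > st.2.2
         then (value, (column.count value : Int)) else st.2)
      else st)
    (PySem.Set.empty, 0, 0)).2.1

-- ===== PRECONDITION & SPEC =====
-- Pre_ excludes only the empty list, on which A raises IndexError (and Python B returns None).
def Pre_FindingCommonValue (column : List Int) : Prop := column ≠ []
instance (column : List Int) : Decidable (Pre_FindingCommonValue column) := by
  unfold Pre_FindingCommonValue; infer_instance
def pvWitness_FindingCommonValue : List Int := [3, 1, 1, 3, 2]

def Spec_FindingCommonValue (column : List Int) (out : Int) : Prop := out = FindingCommonValue_alt column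
instance (column : List Int) (out : Int) : Decidable (Spec_FindingCommonValue column out) := by unfold Spec_FindingCommonValue; infer_instance

-- ===== CLAIM (what is proved, stated in full; the proofs are below) =====
def Claim_equal_FindingCommonValue : Prop := ∀ (column : List Int), Dom_FindingCommonValue column → Pre_FindingCommonValue column → Spec_FindingCommonValue column (FindingCommonValue column)

-- ===== LEMMAS AND PROOFS =====

-- A's counting loop builds Counter(column).
lemma dictA_eq_counter (column : List Int) :
    column.foldl (fun (d : PySem.Dict Int Int) key =>
      if ¬ (d.contains key = true) then d.insert key 1
      else d.modify key 0 (· + 1)) PySem.Dict.empty = PySem.Dict.counter column := by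
  rw [PySem.Dict.counter_eq_foldl]
  apply PySem.List.foldl_congr_mem
  intro d key _
  split_ifs with h
  · rfl
  · rw [show (d.modify key 0 (· + 1)) = d.insert key (d.getD key 0 + 1) from rfl,
        PySem.Dict.getD_of_not_contains d 0 (by simpa using h), zero_add]

-- A's filter-then-[0] over keys = find? over items, for a dict with Nodup keys.
lemma filter_head_eq_find (l : List (Int × Int)) (hnd : (l.map Prod.fst).Nodup) (m : Int) :
    (((PySem.Dict.mk l).keys.filter (fun k =>
        (PySem.Dict.mk l).get? k == some m)).headD 0)
      = (match l.find? (fun p => p.2 == m) with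
         | some p => p.1
         | none => 0) := by
  induction l with
  | nil => rfl
  | cons p rest ih =>
    obtain ⟨k, v⟩ := p
    simp only [List.map_cons, List.nodup_cons] at hnd
    obtain ⟨hk, hrest⟩ := hnd
    by_cases hv : v = m
    · subst hv
      simp [PySem.Dict.keys_mk, PySem.Dict.get?_mk_cons]
    · have hfilter : ∀ x ∈ (PySem.Dict.mk rest).keys,
          ((PySem.Dict.mk ((k, v) :: rest)).get? x == some m)
            = ((PySem.Dict.mk rest).get? x == some m) := by
        intro x hx
        have hxk : ¬ (k == x) := by
          simp only [beq_iff_eq]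
          rintro rfl
          exact hk (by simpa [PySem.Dict.keys] using hx)
        rw [PySem.Dict.get?_mk_cons]
        simp [hxk]
      have hkeys : (PySem.Dict.mk ((k, v) :: rest)).keys = k :: (PySem.Dict.mk rest).keys := by
        simp [PySem.Dict.keys]
      rw [hkeys, List.filter_cons]
      have hkm : ((PySem.Dict.mk ((k, v) :: rest)).get? k == some m) = false := by
        rw [PySem.Dict.get?_mk_cons]
        simp [hv]
      rw [hkm]
      simp only [if_neg Bool.false_ne_true]
      rw [List.filter_congr hfilter, List.find?_cons]
      have : (((k, v) : Int × Int).2 == m) = false := by simp [hv]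
      rw [this]
      exact ih hrest

-- Set.update only appends to the seen list.
lemma update_append (l : List Int) : ∀ (s : PySem.Set Int),
    ∃ r, PySem.Set.update s l = s ++ r := by
  induction l with
  | nil => exact fun s => ⟨[], by simp [PySem.Set.update]⟩
  | cons v t ih =>
    intro s
    have hstep : PySem.Set.update s (v :: t) = PySem.Set.update (PySem.Set.add s v) t := rfl
    obtain ⟨r, hr⟩ := ih (PySem.Set.add s v)
    by_cases h : v ∈ s
    · exact ⟨r, by rw [hstep, hr]; simp [PySem.Set.add, h]⟩
    · exact ⟨v :: r, by rw [hstep, hr]; simp [PySem.Set.add, h]⟩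

-- B's seen-guarded loop = the plain argmax loop over the deduplicated (new) values.
lemma seen_fold (c : Int → Int) : ∀ (l : List Int) (s : PySem.Set Int) (p : Int × Int),
    l.foldl (fun (st : PySem.Set Int × Int × Int) value =>
        if ¬ (st.1.contains value = true) then
          (PySem.Set.add st.1 value,
           if c value > st.2.2 then (value, c value) else st.2)
        else st) (s, p)
    = (PySem.Set.update s l,
       ((PySem.Set.update s l).drop s.length).foldl
         (fun (q : Int × Int) v => if c v > q.2 then (v, c v) else q) p) := by
  intro l
  induction l with
  | nil =>
    intro s p
    simp [PySem.Set.update]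
  | cons v t ih =>
    intro s p
    have hupd : PySem.Set.update s (v :: t) = PySem.Set.update (PySem.Set.add s v) t := rfl
    by_cases h : v ∈ s
    · have hadd : PySem.Set.add s v = s := by simp [PySem.Set.add, h]
      rw [List.foldl_cons, if_neg (by simp [PySem.Set.contains, h]), ih s p, hupd, hadd]
    · have hadd : PySem.Set.add s v = s ++ [v] := by simp [PySem.Set.add, h]
      rw [List.foldl_cons, if_pos (by simp [PySem.Set.contains, h]),
          ih (PySem.Set.add s v) _, hupd]
      obtain ⟨r, hr⟩ := update_append t (PySem.Set.add s v)
      rw [hr, hadd]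
      have h1 : ((s ++ [v]) ++ r).drop s.length = v :: r := by
        rw [List.append_assoc, List.drop_left, List.singleton_append]
      have h2 : ((s ++ [v]) ++ r).drop (s ++ [v]).length = r := by
        rw [List.drop_left]
      rw [h1, h2, List.foldl_cons]

-- The strict running argmax over ks returns the first k with c k equal to the running max.
lemma run_argmax (c : Int → Int) : ∀ (ks : List Int) (b bc : Int),
    ks.foldl (fun (q : Int × Int) v => if c v > q.2 then (v, c v) else q) (b, bc)
    = (if bc < (ks.map c).foldl max bc
       then ((ks.find? (fun k => c k == (ks.map c).foldl max bc)).getD b,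
             (ks.map c).foldl max bc)
       else (b, bc)) := by
  intro ks
  induction ks with
  | nil => intro b bc; simp
  | cons v t ih =>
    intro b bc
    simp only [List.foldl_cons, List.map_cons, List.find?_cons]
    by_cases h : c v > bc
    · rw [if_pos h]
      have hmax : max bc (c v) = c v := by omega
      rw [hmax, ih v (c v)]
      have hle : c v ≤ (t.map c).foldl max (c v) := (PySem.List.le_foldl_max _ _).1
      have hbc : bc < (t.map c).foldl max (c v) := lt_of_lt_of_le h hle
      rw [if_pos hbc]
      by_cases htop : c v < (t.map c).foldl max (c v)
      · rw [if_pos htop]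
        have hne : (c v == (t.map c).foldl max (c v)) = false := by
          simp only [beq_eq_false_iff_ne]; omega
        rw [hne]
        have hmem : (t.map c).foldl max (c v) ∈ t.map c := by
          rcases PySem.List.foldl_max_mem (t.map c) (c v) with h1 | h1
          · omega
          · exact h1
        obtain ⟨k, hk, hck⟩ := List.mem_map.mp hmem
        cases hf : t.find? (fun k => c k == (t.map c).foldl max (c v)) with
        | none =>
          exact absurd (by simp [hck] : (fun k => c k == (t.map c).foldl max (c v)) k = true)
            (by simpa using List.find?_eq_none.mp hf k hk)
        | some kk => simp
      · rw [if_neg htop]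
        have heq : (t.map c).foldl max (c v) = c v := by omega
        have : (c v == (t.map c).foldl max (c v)) = true := by
          simp only [beq_iff_eq]; omega
        rw [this]
        simp [heq]
    · rw [if_neg h]
      have hmax : max bc (c v) = bc := by omega
      rw [hmax, ih b bc]
      by_cases hbc : bc < (t.map c).foldl max bc
      · rw [if_pos hbc, if_pos hbc]
        have : (c v == (t.map c).foldl max bc) = false := by
          simp only [beq_eq_false_iff_ne]; omega
        rw [this]
      · rw [if_neg hbc, if_neg hbc]

-- ===== VERDICT (by name: the statement is the Claim_ definition above) =====
theorem FindingCommonValue_spec : Claim_equal_FindingCommonValue := by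
  intro column _ hne
  unfold Spec_FindingCommonValue FindingCommonValue FindingCommonValue_alt
  simp only [dictA_eq_counter]
  set d := PySem.Dict.counter column with hd
  set c : Int → Int := fun k => (column.count k : Int) with hc
  -- B side: remove the seen-set, then evaluate the plain argmax loop
  rw [seen_fold c column PySem.Set.empty (0, 0)]
  have hupd : PySem.Set.update PySem.Set.empty column = PySem.Set.ofList column := rfl
  have hdrop : (PySem.Set.ofList column).drop ([] : List Int).length = PySem.Set.ofList column := rfl
  simp only [hupd]
  rw [show (PySem.Set.empty : PySem.Set Int).length = 0 from rfl, List.drop_zero,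
      run_argmax c (PySem.Set.ofList column) 0 0]
  -- the set of keys is nonempty and every count is at least 1
  obtain ⟨k0, ks, hks⟩ : ∃ k0 ks, PySem.Set.ofList column = k0 :: ks := by
    cases hof : PySem.Set.ofList column with
    | nil =>
      exfalso
      cases column with
      | nil => exact hne rfl
      | cons a t =>
        have : a ∈ PySem.Set.ofList (a :: t) := (PySem.Set.mem_ofList _ _).mpr (by simp)
        rw [hof] at this; simp at this
    | cons k0 ks => exact ⟨k0, ks, rfl⟩
  have hck0 : 1 ≤ c k0 := by
    have : k0 ∈ column := (PySem.Set.mem_ofList column k0).mp (by rw [hks]; simp)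
    have := List.count_pos_iff.mpr this
    simp only [hc]
    exact_mod_cast this
  -- the running max from 0 equals Python's max(values)
  have hM0 : ((PySem.Set.ofList column).map c).foldl max 0 = ((ks.map c).foldl max (c k0)) := by
    rw [hks]
    simp only [List.map_cons, List.foldl_cons]
    rw [max_eq_right (by omega : (0 : Int) ≤ c k0)]
  set M := (ks.map c).foldl max (c k0) with hMdef
  have hk0M : c k0 ≤ M := (PySem.List.le_foldl_max _ _).1
  have hMpos : 0 < M := lt_of_lt_of_le hck0 hk0M
  rw [hM0, if_pos hMpos]
  -- A side: values and items of the counter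
  have hvals : d.values = c k0 :: ks.map c := by
    rw [hd, show (PySem.Dict.counter column).values
          = (PySem.Dict.counter column).items.map (·.2) from rfl,
        PySem.Dict.items_counter, hks]
    simp [hc]
  have hmax? : PySem.List.max? d.values (fun v => v) = some M := by
    rw [hvals, PySem.List.max?_id_cons]
  rw [hmax?]
  have hnd : d.keys.Nodup := PySem.Dict.nodup_keys_counter column
  have hfh := filter_head_eq_find d.items (by
      simpa [PySem.Dict.keys] using hnd) M
  calc ((d.keys.filter (fun k => d.get? k == some M)).headD 0)
      = (match d.items.find? (fun p => p.2 == M) with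
         | some p => p.1 | none => 0) := hfh
    _ = ((PySem.Set.ofList column).find? (fun k => c k == M)).getD 0 := by
        rw [hd, PySem.Dict.items_counter, List.find?_map]
        cases hf : (PySem.Set.ofList column).find? ((fun p => p.2 == M) ∘ (fun k => (k, (column.count k : Int)))) with
        | none =>
          have : (PySem.Set.ofList column).find? (fun k => c k == M) = none := by
            simpa [hc, Function.comp] using hf
          simp [this]
        | some k =>
          have : (PySem.Set.ofList column).find? (fun k => c k == M) = some k := by
            simpa [hc, Function.comp] using hf
          simp [this]
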